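-- pv_equiv track=rewrite | github.com/don-alejandrino/aoc2024 | src/09.py | defragment_disk_part_1
-- ===== SOURCE A (Python) =====
-- def defragment_disk_part_1(layout: list[int]):
--     layout = layout.copy()
--     occupied_disk_size = len(layout) - layout.count(-1)
--     free_space_idcs= []
--     for i, block in enumerate(layout):
--         if block == -1 and i < occupied_disk_size:
--             free_space_idcs.append(i)
--
--     for i, block in enumerate(layout[::-1]):
--         idx = len(layout) - i - 1
--         if free_space_idcs and block != -1:
--             layout[free_space_idcs.pop(0)] = block
--             layout[idx] = -1
--
--     return layout
-- ===== SOURCE B (Python) =====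
-- def defragment_disk_part_1(layout: list[int]):
--     # Rebuild the compacted layout directly: fill the occupied-size prefix,
--     # replacing each free slot with the next rightmost block from the tail,
--     # and pad the rest with -1. One pass, no in-place mutation or free-index queue.
--     n_occ = sum(1 for x in layout if x != -1)
--     movers = [x for x in reversed(layout[n_occ:]) if x != -1]
--     out = []
--     for x in layout[:n_occ]:
--         if x != -1:
--             out.append(x)
--         else:
--             out.append(movers[0])
--             movers = movers[1:]
--     out += [-1] * (len(layout) - n_occ)
--     return out
-- ===== Notes on version B (the rewrite author's own statement) =====
-- stated objective: simpler
-- what changed: B rebuilds the result functionally in one left-to-right pass: it counts the occupied size, precomputes the movers as the non-free blocks of the reversed tail, fills the prefix's free slots from that list and pads with -1, instead of A's in-place mutation driven by an explicit free-index queue consumed with pop(0) and a full reversed enumerate scan.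
import Mathlib
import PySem

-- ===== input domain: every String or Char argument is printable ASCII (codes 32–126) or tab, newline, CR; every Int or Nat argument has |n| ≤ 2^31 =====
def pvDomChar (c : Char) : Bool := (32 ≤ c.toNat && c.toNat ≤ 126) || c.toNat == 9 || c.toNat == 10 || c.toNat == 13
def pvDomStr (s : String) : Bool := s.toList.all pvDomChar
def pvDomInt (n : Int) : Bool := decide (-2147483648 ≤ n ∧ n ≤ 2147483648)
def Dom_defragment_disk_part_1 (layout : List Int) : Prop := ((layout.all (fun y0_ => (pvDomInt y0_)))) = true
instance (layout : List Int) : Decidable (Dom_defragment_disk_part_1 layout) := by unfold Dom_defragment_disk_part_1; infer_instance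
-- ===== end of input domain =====

-- B rebuilds the compacted layout functionally in one pass (prefix fill + replicate pad)
-- instead of A's in-place mutation via a free-index queue; objective: simpler. Return value only (A copies its argument).

-- ===== PORT A =====
-- one step of A's second loop: `if free_space_idcs and block != -1: layout[free.pop(0)] = block; layout[idx] = -1`
def pvStepA (n : Nat) (st : List Int × List Int) (p : Int × Int) : List Int × List Int :=
  if st.2 ≠ [] ∧ p.2 ≠ -1 then
    (PySem.List.pySetD (PySem.List.pySetD st.1 (st.2.headD 0) p.2) ((n : Int) - p.1 - 1) (-1), st.2.tail)
  else st

def defragment_disk_part_1 (layout : List Int) : List Int :=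
  -- layout = layout.copy()  (no mutation of the argument; we work on the value)
  let occ : Int := (layout.length : Int) - (PySem.List.count layout (-1) : Int)
  -- for i, block in enumerate(layout): if block == -1 and i < occ: free.append(i)
  let free : List Int := (PySem.List.enumerate layout).foldl
    (fun acc p => if p.2 = -1 ∧ p.1 < occ then acc ++ [p.1] else acc) []
  -- for i, block in enumerate(layout[::-1]): idx = len - i - 1; …
  let res := (PySem.List.enumerate layout.reverse).foldl (pvStepA layout.length) (layout, free)
  res.1

-- ===== PORT B =====
def defragment_disk_part_1_alt (layout : List Int) : List Int :=
  -- n_occ = sum(1 for x in layout if x != -1)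
  let nOcc : Nat := layout.countP (fun x => decide (x ≠ -1))
  -- movers = [x for x in reversed(layout[n_occ:]) if x != -1]
  let movers : List Int := (layout.drop nOcc).reverse.filter (fun x => decide (x ≠ -1))
  -- for x in layout[:n_occ]: append x, or movers[0] (provably in range) and movers = movers[1:]
  let st := (layout.take nOcc).foldl
    (fun (st : List Int × List Int) x =>
      if x ≠ -1 then (st.1 ++ [x], st.2) else (st.1 ++ [st.2.headD (-1)], st.2.tail))
    ([], movers)
  -- out += [-1] * (len(layout) - n_occ)
  st.1 ++ List.replicate (layout.length - nOcc) (-1)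

-- ===== PRECONDITION & SPEC =====
def Spec_defragment_disk_part_1 (layout : List Int) (out : List Int) : Prop := out = defragment_disk_part_1_alt layout
instance (layout : List Int) (out : List Int) : Decidable (Spec_defragment_disk_part_1 layout out) := by unfold Spec_defragment_disk_part_1; infer_instance

-- ===== CLAIM (what is proved, stated in full; the proofs are below) =====
def Claim_equal_defragment_disk_part_1 : Prop := ∀ (layout : List Int), Dom_defragment_disk_part_1 layout → Spec_defragment_disk_part_1 layout (defragment_disk_part_1 layout)

-- ===== LEMMAS AND PROOFS =====

def pvCasts : List Nat → List Int
  | [] => []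
  | k :: t => (k : Int) :: pvCasts t

theorem pvCasts_cons (h : Nat) (t : List Nat) : pvCasts (h :: t) = (h : Int) :: pvCasts t := rfl

theorem pvCasts_map_add_one (l : List Nat) : pvCasts (l.map (· + 1)) = (pvCasts l).map (· + 1) := by
  induction l with
  | nil => rfl
  | cons k t ih =>
    simp only [List.map_cons, pvCasts, ih]
    refine congrArg₂ _ ?_ rfl
    push_cast
    ring

-- positions of the -1 entries of a list, in increasing order
def pvHoles : List Int → List Nat
  | [] => []
  | x :: xs => if x = -1 then 0 :: (pvHoles xs).map (· + 1) else (pvHoles xs).map (· + 1)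

-- prefix filled with movers: each -1 slot takes the next mover
def pvFill : List Int → List Int → List Int
  | [], _ => []
  | x :: xs, ms => if x = -1 then ms.headD (-1) :: pvFill xs ms.tail else x :: pvFill xs ms

theorem pvHoles_length (P : List Int) : (pvHoles P).length = P.countP (fun x => decide (x = -1)) := by
  induction P with
  | nil => rfl
  | cons x xs ih =>
    by_cases hx : x = -1 <;> simp [pvHoles, hx, List.countP_cons, ih]

theorem pvHoles_lt {P : List Int} {h : Nat} (hm : h ∈ pvHoles P) : h < P.length := by
  induction P generalizing h with
  | nil => simp [pvHoles] at hm
  | cons x xs ih =>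
    by_cases hx : x = -1 <;> simp [pvHoles, hx] at hm
    · rcases hm with rfl | ⟨a, ha, rfl⟩
      · simp
      · have := ih ha; simp; omega
    · rcases hm with ⟨a, ha, rfl⟩
      have := ih ha; simp; omega

theorem pvFill_of_holes_nil {P : List Int} (h : pvHoles P = []) (ms : List Int) : pvFill P ms = P := by
  induction P generalizing ms with
  | nil => rfl
  | cons x xs ih =>
    by_cases hx : x = -1 <;> simp [pvHoles, hx] at h <;> simp [pvFill, hx, ih h]

theorem pvFill_set {P : List Int} {h : Nat} {t : List Nat} (hh : pvHoles P = h :: t) {m : Int}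
    (hm : m ≠ -1) (ms : List Int) :
    pvFill (P.set h m) ms = pvFill P (m :: ms) ∧ pvHoles (P.set h m) = t := by
  induction P generalizing h t ms with
  | nil => simp [pvHoles] at hh
  | cons x xs ih =>
    by_cases hx : x = -1
    · simp [pvHoles, hx] at hh
      obtain ⟨rfl, rfl⟩ := hh
      simp [pvFill, pvHoles, hx, hm]
    · simp [pvHoles, hx] at hh
      rcases hxs : pvHoles xs with _ | ⟨h', t'⟩
      · simp [hxs] at hh
      · simp [hxs] at hh
        obtain ⟨rfl, rfl⟩ := hh
        have := ih (h := h') (t := t') hxs ms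
        simp [List.set_cons_succ, pvFill, pvHoles, hx, this.1, this.2]

-- A's second loop does nothing once the free list is empty
theorem pvPhase2 (n : Nat) (ps : List (Int × Int)) (cur : List Int) :
    ps.foldl (pvStepA n) (cur, []) = (cur, []) := by
  induction ps generalizing cur with
  | nil => rfl
  | cons p ps ih => simpa [pvStepA] using ih cur

-- A's second loop over the reversed tail: fills the holes of P with the movers and clears the tail
theorem pvPhase1 (n : Nat) (rs : List Int) : ∀ (T P : List Int),
    n = P.length + rs.length + T.length →
    (pvHoles P).length = (rs.filter (fun x => decide (x ≠ -1))).length →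
    (PySem.List.enumerate rs (T.length : Int)).foldl (pvStepA n)
        (P ++ rs.reverse ++ T, pvCasts (pvHoles P))
      = (pvFill P (rs.filter (fun x => decide (x ≠ -1))) ++ List.replicate rs.length (-1) ++ T, []) := by
  induction rs with
  | nil =>
    intro T P hn hlen
    simp at hlen
    have h0 : pvHoles P = [] := hlen
    simp [PySem.List.enumerate, h0, pvCasts, pvFill_of_holes_nil h0]
  | cons r rs ih =>
    intro T P hn hlen
    rw [PySem.List.enumerate_cons]
    by_cases hr : r = -1
    · -- skipped block
      have hstep : pvStepA n (P ++ (r :: rs).reverse ++ T, pvCasts (pvHoles P)) ((T.length : Int), r)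
          = (P ++ (r :: rs).reverse ++ T, pvCasts (pvHoles P)) := by
        simp [pvStepA, hr]
      rw [List.foldl_cons, hstep]
      have hc : P ++ (r :: rs).reverse ++ T = P ++ rs.reverse ++ (r :: T) := by
        simp [List.reverse_cons, List.append_assoc]
      have hT : ((T.length : Int) + 1) = (((r :: T).length : Nat) : Int) := by simp
      rw [hc, hT]
      have := ih (r :: T) P (by simp only [List.length_cons] at hn ⊢; omega) (by simpa [hr] using hlen)
      rw [this]
      simp [hr, List.replicate_succ', List.append_assoc]
    · -- moved block
      have hlen' : (pvHoles P).length = (rs.filter (fun x => decide (x ≠ -1))).length + 1 := by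
        simpa [hr] using hlen
      rcases hP : pvHoles P with _ | ⟨h, t⟩
      · simp [hP] at hlen'
      have hhlt : h < P.length := pvHoles_lt (by simp [hP])
      have hfill := pvFill_set hP hr (rs.filter (fun x => decide (x ≠ -1)))
      -- evaluate the step
      have hidx : (n : Int) - (T.length : Int) - 1 = ((P.length + rs.length : Nat) : Int) := by
        simp at hn ⊢; omega
      have hstep : pvStepA n (P ++ (r :: rs).reverse ++ T, pvCasts (h :: t)) ((T.length : Int), r)
          = (P.set h r ++ rs.reverse ++ ((-1) :: T), pvCasts t) := by
        unfold pvStepA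
        rw [if_pos (And.intro (by simp [pvCasts]) hr)]
        rw [pvCasts_cons]
        simp only [List.headD_cons, List.tail_cons]
        rw [hidx, PySem.List.pySetD_natCast, PySem.List.pySetD_natCast]
        have e1 : (P ++ (r :: rs).reverse ++ T).set h r = P.set h r ++ (r :: rs).reverse ++ T := by
          rw [List.append_assoc, List.set_append, if_pos hhlt, List.append_assoc]
        rw [e1]
        have e2 : P.set h r ++ (r :: rs).reverse ++ T
            = (P.set h r ++ rs.reverse) ++ ([r] ++ T) := by
          simp [List.reverse_cons, List.append_assoc]
        rw [e2, List.set_append, if_neg (by simp)]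
        have e3 : P.length + rs.length - (P.set h r ++ rs.reverse).length = 0 := by simp
        simp [e3, List.append_assoc]
      rw [List.foldl_cons, hstep]
      have hT : ((T.length : Int) + 1) = ((((-1 : Int) :: T).length : Nat) : Int) := by simp
      rw [hT, ← hfill.2]
      have := ih ((-1) :: T) (P.set h r) (by simp only [List.length_cons, List.length_set] at hn ⊢; omega)
        (by rw [hfill.2]; rw [hP] at hlen'; simp only [List.length_cons] at hlen'; omega)
      rw [this]
      rw [hfill.1]
      have hfc : (r :: rs).filter (fun x => decide (x ≠ -1)) = r :: rs.filter (fun x => decide (x ≠ -1)) := by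
        simp [hr]
      rw [hfc]
      simp [List.replicate_succ', List.append_assoc]

-- B's output loop is pvFill
theorem pvAltFold (xs : List Int) : ∀ (acc ms : List Int),
    (xs.foldl (fun (st : List Int × List Int) x =>
        if x ≠ -1 then (st.1 ++ [x], st.2) else (st.1 ++ [st.2.headD (-1)], st.2.tail)) (acc, ms)).1
      = acc ++ pvFill xs ms := by
  induction xs with
  | nil => intro acc ms; simp [pvFill]
  | cons x xs ih =>
    intro acc ms
    rw [List.foldl_cons]
    by_cases hx : x = -1
    · have e : (if x ≠ -1 then ((acc, ms).1 ++ [x], (acc, ms).2)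
          else ((acc, ms).1 ++ [(acc, ms).2.headD (-1)], (acc, ms).2.tail))
          = (acc ++ [ms.headD (-1)], ms.tail) := by simp [hx]
      rw [e, ih]
      simp [pvFill, hx, List.append_assoc]
    · have e : (if x ≠ -1 then ((acc, ms).1 ++ [x], (acc, ms).2)
          else ((acc, ms).1 ++ [(acc, ms).2.headD (-1)], (acc, ms).2.tail))
          = (acc ++ [x], ms) := by simp [hx]
      rw [e, ih]
      simp [pvFill, hx, List.append_assoc]

-- A's first loop collects exactly the holes of the occupied-size prefix
theorem pvEnumHoles (xs : List Int) : ∀ (s : Int),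
    ((PySem.List.enumerate xs s).filter (fun p => decide (p.2 = -1))).map (·.1)
      = (pvCasts (pvHoles xs)).map (fun q => q + s) := by
  induction xs with
  | nil => intro s; simp [PySem.List.enumerate, pvHoles, pvCasts]
  | cons x xs ih =>
    intro s
    rw [PySem.List.enumerate_cons]
    by_cases hx : x = -1
    · simp only [List.filter_cons, hx, decide_true, if_pos, List.map_cons, pvHoles, if_true,
        ih (s + 1), pvCasts, pvCasts_map_add_one, List.map_map]
      refine congrArg₂ _ (by simp) (List.map_congr_left (fun a _ => ?_))
      simp [Function.comp]
      ring
    · simp only [List.filter_cons, hx, pvHoles, decide_false, Bool.false_eq_true, if_false,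
        ih (s + 1), pvCasts_map_add_one, List.map_map]
      refine List.map_congr_left (fun a _ => ?_)
      simp [Function.comp]
      ring

theorem pvCountPos {α : Type} (l : List α) (p : α → Bool) :
    l.countP p + l.countP (fun x => !(p x)) = l.length := by
  induction l with
  | nil => rfl
  | cons x xs ih =>
    by_cases hx : p x <;> simp [List.countP_cons, hx] <;> omega

-- ===== VERDICT (by name: the statement is the Claim_ definition above) =====
theorem defragment_disk_part_1_spec : Claim_equal_defragment_disk_part_1 := by
  intro layout _
  unfold Spec_defragment_disk_part_1 defragment_disk_part_1 defragment_disk_part_1_alt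
  have hOccLe : layout.countP (fun x => decide (x ≠ -1)) ≤ layout.length := List.countP_le_length
  set nOcc := layout.countP (fun x => decide (x ≠ -1)) with hOccDef
  have hsum := pvCountPos layout (fun x => decide (x ≠ -1))
  have hcnt : List.count (-1) layout = layout.countP (fun x => !(decide (x ≠ -1))) := by
    rw [List.count_eq_countP]
    refine List.countP_congr (fun a _ => ?_)
    by_cases ha : a = -1 <;> simp [ha]
  have hocc : (layout.length : Int) - (PySem.List.count layout (-1) : Int) = (nOcc : Int) := by
    rw [PySem.List.count_eq, hcnt]
    omega
  have hsplit : layout.take nOcc ++ layout.drop nOcc = layout := List.take_append_drop _ _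
  have htlen : (layout.take nOcc).length = nOcc := by
    rw [List.length_take]; omega
  -- the first loop collects exactly the holes of the occupied-size prefix
  have hfilter : (PySem.List.enumerate layout).filter (fun q => decide (q.2 = -1 ∧ q.1 < (nOcc : Int)))
      = (PySem.List.enumerate (layout.take nOcc)).filter (fun q => decide (q.2 = -1)) := by
    conv_lhs => rw [← hsplit]
    rw [PySem.List.enumerate_append, List.filter_append]
    have h1 : (PySem.List.enumerate (layout.take nOcc)).filter (fun q => decide (q.2 = -1 ∧ q.1 < (nOcc : Int)))
        = (PySem.List.enumerate (layout.take nOcc)).filter (fun q => decide (q.2 = -1)) := by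
      refine List.filter_congr (fun q hq => ?_)
      rw [PySem.List.mem_enumerate_iff] at hq
      obtain ⟨k, hk, rfl⟩ := hq
      rw [htlen] at hk
      simp only [decide_eq_decide]
      exact and_iff_left (by push_cast; omega)
    have h2 : (PySem.List.enumerate (layout.drop nOcc) (0 + ((layout.take nOcc).length : Int))).filter
        (fun q => decide (q.2 = -1 ∧ q.1 < (nOcc : Int))) = [] := by
      refine List.filter_eq_nil_iff.mpr (fun q hq => ?_)
      rw [PySem.List.mem_enumerate_iff] at hq
      obtain ⟨k, hk, rfl⟩ := hq
      rw [htlen]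
      simp only [decide_eq_true_eq, not_and]
      intro _
      push_cast
      omega
    rw [h1, h2, List.append_nil]
  have hfree : ((PySem.List.enumerate (layout.take nOcc)).filter (fun q => decide (q.2 = -1))).map (·.1)
      = pvCasts (pvHoles (layout.take nOcc)) := by
    rw [pvEnumHoles]
    simp
  -- the free list is as long as the list of movers
  have hlen13 : (pvHoles (layout.take nOcc)).length
      = ((layout.drop nOcc).reverse.filter (fun x => decide (x ≠ -1))).length := by
    rw [pvHoles_length, List.filter_reverse, List.length_reverse, ← List.countP_eq_length_filter]
    have hap : (layout.take nOcc).countP (fun x => decide (x ≠ -1))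
        + (layout.drop nOcc).countP (fun x => decide (x ≠ -1)) = nOcc := by
      rw [← List.countP_append, hsplit]
    have hcompl := pvCountPos (layout.take nOcc) (fun x => decide (x ≠ -1))
    have hco : (layout.take nOcc).countP (fun x => decide (x = -1))
        = (layout.take nOcc).countP (fun x => !(decide (x ≠ -1))) := by
      refine List.countP_congr (fun a _ => ?_)
      by_cases ha : a = -1 <;> simp [ha]
    rw [htlen] at hcompl
    omega
  -- run A's second loop: reversed-tail phase fills the holes, reversed-prefix phase is a no-op
  have hph1 := pvPhase1 layout.length ((layout.drop nOcc).reverse) [] (layout.take nOcc)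
    (by simp only [List.length_nil, List.length_reverse, List.length_drop, htlen]; omega) hlen13
  simp only [List.length_nil, Nat.cast_zero, List.append_nil, List.reverse_reverse] at hph1
  rw [hsplit] at hph1
  have hrev : layout.reverse = (layout.drop nOcc).reverse ++ (layout.take nOcc).reverse := by
    conv_lhs => rw [← hsplit]
    rw [List.reverse_append]
  simp only [hocc]
  rw [PySem.List.foldl_append_ite (fun q : Int × Int => q.2 = -1 ∧ q.1 < (nOcc : Int)) (fun q => q.1)]
  rw [List.nil_append, hfilter, hfree, hrev, PySem.List.enumerate_append, List.foldl_append, hph1,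
    pvPhase2, pvAltFold]
  simp only [List.nil_append, List.length_reverse, List.length_drop]
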